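-- pv_equiv track=rewrite | github.com/BernardoFaria/Fundamentals-of-Programming | Projeto 2/Projeto2.py | figura
-- ===== SOURCE A (Python) =====
-- def figura(digrm, chave):
--     for a in range(len(chave)):
--         for b in range(len(chave[a])):
--             if chave[a][b] == digrm[0]:
--                 pos1 = (a, b)
--     for c in range(len(chave)):
--         for d in range(len(chave[c])):
--             if chave[c][d] == digrm[1]:
--                 pos2 = (c, d)
--     if pos1[0] == pos2[0]:
--         return ('l', pos1, pos2)
--     elif pos1[1] == pos2[1]:
--         return ('c', pos1, pos2)
--     else:
--         return ('r', pos1, pos2)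
-- ===== SOURCE B (Python) =====
-- def figura(digrm, chave):
--     # index the grid once: value -> last position holding it; then two O(1) lookups
--     last = {}
--     for a, row in enumerate(chave):
--         for b, cell in enumerate(row):
--             last[cell] = (a, b)
--     pos1 = last[digrm[0]]
--     pos2 = last[digrm[1]]
--     if pos1[0] == pos2[0]:
--         return ('l', pos1, pos2)
--     elif pos1[1] == pos2[1]:
--         return ('c', pos1, pos2)
--     else:
--         return ('r', pos1, pos2)
-- ===== Notes on version B (the rewrite author's own statement) =====
-- stated objective: alternative
-- what changed: A scans the whole grid once per searched character (two independent nested index loops); B builds a dict index value->last-position in a single grid pass and replaces both character scans by O(1) dict lookups.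
import Mathlib
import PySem

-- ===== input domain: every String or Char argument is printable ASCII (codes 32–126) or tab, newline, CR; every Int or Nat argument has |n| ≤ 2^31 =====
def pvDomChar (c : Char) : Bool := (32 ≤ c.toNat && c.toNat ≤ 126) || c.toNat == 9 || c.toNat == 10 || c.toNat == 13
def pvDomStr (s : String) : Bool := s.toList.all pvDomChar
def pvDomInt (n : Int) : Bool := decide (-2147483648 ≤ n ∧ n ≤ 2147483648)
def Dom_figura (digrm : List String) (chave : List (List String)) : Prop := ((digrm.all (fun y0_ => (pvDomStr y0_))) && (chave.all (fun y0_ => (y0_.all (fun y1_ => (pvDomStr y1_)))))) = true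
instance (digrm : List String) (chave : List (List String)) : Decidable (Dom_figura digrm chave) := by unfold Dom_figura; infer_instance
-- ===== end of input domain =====

-- B replaces A's per-character grid scans by a dict index (value -> last position) built in
-- one pass, with both characters then looked up in O(1); objective: alternative algorithm.

-- ===== PORT A =====
-- A's scan for one character: for i in range(len(chave)): for j in range(len(chave[i])):
-- if chave[i][j] == d: pos = (i, j).  The unbound-variable state is Option (none = unbound);
-- Pre_figura guarantees a match, so the none case (Python NameError) is excluded.
def pvScanA (d : String) (chave : List (List String)) : Option (Int × Int) :=
  (PySem.List.pyRange 0 (chave.length : Int) 1).foldl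
    (fun pos a =>
      let row := PySem.List.pyGetD chave a []
      (PySem.List.pyRange 0 (row.length : Int) 1).foldl
        (fun pos b => if PySem.List.pyGetD row b "" = d then some (a, b) else pos) pos)
    none

def figura (digrm : List String) (chave : List (List String)) : String × (Int × Int) × (Int × Int) :=
  match pvScanA (PySem.List.pyGetD digrm 0 "") chave,
        pvScanA (PySem.List.pyGetD digrm 1 "") chave with
  | some pos1, some pos2 =>
      if pos1.1 = pos2.1 then ("l", pos1, pos2)
      else if pos1.2 = pos2.2 then ("c", pos1, pos2)
      else ("r", pos1, pos2)
  | _, _ => ("", (0, 0), (0, 0))   -- Python raises NameError here; outside Pre_figura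

-- ===== PORT B =====
-- last = {}; for a, row in enumerate(chave): for b, cell in enumerate(row): last[cell] = (a, b)
def pvIndex (chave : List (List String)) : PySem.Dict String (Int × Int) :=
  (PySem.List.enumerate chave 0).foldl
    (fun d p =>
      (PySem.List.enumerate p.2 0).foldl (fun d q => d.insert q.2 (p.1, q.1)) d)
    PySem.Dict.empty

def figura_alt (digrm : List String) (chave : List (List String)) : String × (Int × Int) × (Int × Int) :=
  let idx := pvIndex chave
  -- each lookup's KeyError (none) case is outside Pre_figura
  match idx.get? (PySem.List.pyGetD digrm 0 "") with
  | none => ("", (0, 0), (0, 0))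
  | some pos1 =>
    match idx.get? (PySem.List.pyGetD digrm 1 "") with
    | none => ("", (0, 0), (0, 0))
    | some pos2 =>
      if pos1.1 = pos2.1 then ("l", pos1, pos2)
      else if pos1.2 = pos2.2 then ("c", pos1, pos2)
      else ("r", pos1, pos2)

-- ===== PRECONDITION & SPEC =====
-- Pre_ excludes exactly the inputs where Python A raises: digrm shorter than 2 (IndexError)
-- or one of its first two characters absent from the grid (NameError on unbound pos1/pos2).
def Pre_figura (digrm : List String) (chave : List (List String)) : Prop :=
  2 ≤ digrm.length ∧ digrm.getD 0 "" ∈ chave.flatten ∧ digrm.getD 1 "" ∈ chave.flatten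
instance (digrm : List String) (chave : List (List String)) : Decidable (Pre_figura digrm chave) := by unfold Pre_figura; infer_instance

def pvWitness_figura : List String × List (List String) := (["a", "b"], [["a", "b"]])

def Spec_figura (digrm : List String) (chave : List (List String)) (out : String × (Int × Int) × (Int × Int)) : Prop := out = figura_alt digrm chave
instance (digrm : List String) (chave : List (List String)) (out : String × (Int × Int) × (Int × Int)) : Decidable (Spec_figura digrm chave out) := by unfold Spec_figura; infer_instance

-- ===== CLAIM (what is proved, stated in full; the proofs are below) =====
def Claim_equal_figura : Prop := ∀ (digrm : List String) (chave : List (List String)), Dom_figura digrm chave → Pre_figura digrm chave → Spec_figura digrm chave (figura digrm chave)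

-- ===== LEMMAS AND PROOFS =====

/-- Fold fusion: a function commuting with the step maps one fold to another. -/
theorem pv_foldl_fusion {α β γ : Type} (h : α → γ) (f : α → β → α) (g : γ → β → γ)
    (hc : ∀ a b, h (f a b) = g (h a) b) :
    ∀ (l : List β) (a : α), h (l.foldl f a) = l.foldl g (h a) := by
  intro l
  induction l with
  | nil => intro a; rfl
  | cons x xs ih => intro a; simp only [List.foldl]; rw [ih, hc]

/-- Looking a key up in B's dict index yields exactly A's last-match scan for that key. -/
theorem get?_pvIndex (k : String) (chave : List (List String)) :
    (pvIndex chave).get? k = pvScanA k chave := by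
  unfold pvIndex pvScanA
  have hinner : ∀ (a : Int) (row : List String) (d : PySem.Dict String (Int × Int)),
      ((PySem.List.enumerate row 0).foldl (fun d q => d.insert q.2 (a, q.1)) d).get? k
      = (PySem.List.pyRange 0 (row.length : Int) 1).foldl
          (fun pos b => if PySem.List.pyGetD row b "" = k then some (a, b) else pos)
          (d.get? k) := by
    intro a row d
    refine (pv_foldl_fusion (fun d => PySem.Dict.get? d k)
        (fun d q => d.insert q.2 (a, q.1))
        (fun acc q => if q.2 = k then some (a, q.1) else acc)
        (by
          intro d q
          simp only []
          rw [PySem.Dict.get?_insert]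
          simp [eq_comm])
        (PySem.List.enumerate row 0) d).trans ?_
    rw [PySem.List.enumerate_eq_map_pyRange row ("" : String), List.foldl_map]
    simp [PySem.List.len_eq]
  refine (pv_foldl_fusion (fun d => PySem.Dict.get? d k)
      (fun d p => (PySem.List.enumerate p.2 0).foldl (fun d q => d.insert q.2 (p.1, q.1)) d)
      (fun acc p =>
        (PySem.List.pyRange 0 (p.2.length : Int) 1).foldl
          (fun pos b => if PySem.List.pyGetD p.2 b "" = k then some (p.1, b) else pos) acc)
      (by intro d p; exact hinner p.1 p.2 d)
      (PySem.List.enumerate chave 0) PySem.Dict.empty).trans ?_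
  rw [PySem.List.enumerate_eq_map_pyRange chave ([] : List String), List.foldl_map]
  simp [PySem.List.len_eq, PySem.Dict.get?_empty]

-- ===== VERDICT (by name: the statement is the Claim_ definition above) =====
theorem figura_spec : Claim_equal_figura := by
  intro digrm chave _ _
  unfold Spec_figura figura figura_alt
  simp only [get?_pvIndex]
  cases pvScanA (PySem.List.pyGetD digrm 0 "") chave <;>
    cases pvScanA (PySem.List.pyGetD digrm 1 "") chave <;> rfl
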